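-- pv_equiv track=rewrite | github.com/Tabaxi3000/CS229FinalProject | python/knock.py | get_best_discard
-- ===== SOURCE A (Python) =====
-- def find_melds(hand):
--     if not hand:
--         return []
--
--     melds = []
--     ranks = {}
--     suits = {}
--
--     for card in hand:
--         rank = card % 13
--         suit = card // 13
--         ranks.setdefault(rank, []).append(card)
--         suits.setdefault(suit, []).append(card)
--
--     for cards in ranks.values():
--         if len(cards) >= 3:
--             melds.append(cards[:])
--
--     for cards in suits.values():
--         cards.sort(key=lambda x: x % 13)
--         i = 0
--         while i < len(cards) - 2:
--             run = [cards[i]]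
--             j = i + 1
--             while j < len(cards) and cards[j] % 13 == (run[-1] % 13) + 1:
--                 run.append(cards[j])
--                 j += 1
--             if len(run) >= 3:
--                 melds.append(run)
--             i = j if j > i + 1 else i + 1
--
--     return melds
--
-- def get_deadwood(hand, melds=None):
--     if not hand:
--         return float('inf')
--
--     if melds is None:
--         melds = find_melds(hand)
--
--     if not melds:
--         return sum(min(10, x % 13 + 1) for x in hand)
--
--     min_deadwood = float('inf')
--
--     for i in range(1 << len(melds)):
--         used = set()
--         valid = True
--
--         for j in range(len(melds)):
--             if i & (1 << j):
--                 meld = melds[j]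
--                 if any(card in used for card in meld):
--                     valid = False
--                     break
--                 used.update(meld)
--
--         if valid:
--             unmatched = [card for card in hand if card not in used]
--             deadwood = sum(min(10, x % 13 + 1) for x in unmatched)
--             min_deadwood = min(min_deadwood, deadwood)
--
--     return min_deadwood
--
-- def get_best_discard(hand):
--     if not hand:
--         return None
--
--     best_card = None
--     min_deadwood = float('inf')
--
--     for card in hand:
--         test_hand = hand.copy()
--         test_hand.remove(card)
--         deadwood = get_deadwood(test_hand)
--         if deadwood < min_deadwood:
--             min_deadwood = deadwood
--             best_card = card
--
--     return best_card
-- ===== SOURCE B (Python) =====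
-- def _take_chain(prev, cards):
--     # first maximal rank-consecutive chain continuing prev, plus the remainder
--     if cards and cards[0] % 13 == prev % 13 + 1:
--         ch, rest = _take_chain(cards[0], cards[1:])
--         return [cards[0]] + ch, rest
--     return [], cards
--
--
-- def _chains(cards):
--     # split a rank-sorted list into its maximal rank-consecutive chains
--     if not cards:
--         return []
--     ch, rest = _take_chain(cards[0], cards[1:])
--     return [[cards[0]] + ch] + _chains(rest)
--
--
-- def _melds(hand):
--     rank_groups = [[c for c in hand if c % 13 == r]
--                    for r in dict.fromkeys(c % 13 for c in hand)]
--     melds = [g for g in rank_groups if len(g) >= 3]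
--     for s in dict.fromkeys(c // 13 for c in hand):
--         cards = sorted((c for c in hand if c // 13 == s), key=lambda x: x % 13)
--         melds += [ch for ch in _chains(cards) if len(ch) >= 3]
--     return melds
--
--
-- def _best_deadwood(hand, melds, used):
--     # backtracking: skip the first meld, or use it when disjoint from `used`
--     if not melds:
--         return sum(min(10, c % 13 + 1) for c in hand if c not in used)
--     best = _best_deadwood(hand, melds[1:], used)
--     if used.isdisjoint(melds[0]):
--         best = min(best, _best_deadwood(hand, melds[1:], used | set(melds[0])))
--     return best
--
--
-- def get_best_discard(hand):
--     if len(hand) < 2: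
--         return None
--
--     def after(card):
--         rest = hand.copy()
--         rest.remove(card)
--         return _best_deadwood(rest, _melds(rest), set())
--
--     return min(hand, key=after)
-- ===== Notes on version B (the rewrite author's own statement) =====
-- stated objective: alternative
-- what changed: B replaces A's dict-of-lists meld finder by an ordered-groupby over first-occurrence keys with a recursive maximal-chain splitter for runs, and replaces A's 2^m bitmask enumeration of meld subsets by recursive backtracking over the meld list (skip the meld, or use it when disjoint from the cards already matched, pruning conflicting branches); A's strict-improvement discard loop becomes min(hand, key=deadwood-after-discard).
import Mathlib
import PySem

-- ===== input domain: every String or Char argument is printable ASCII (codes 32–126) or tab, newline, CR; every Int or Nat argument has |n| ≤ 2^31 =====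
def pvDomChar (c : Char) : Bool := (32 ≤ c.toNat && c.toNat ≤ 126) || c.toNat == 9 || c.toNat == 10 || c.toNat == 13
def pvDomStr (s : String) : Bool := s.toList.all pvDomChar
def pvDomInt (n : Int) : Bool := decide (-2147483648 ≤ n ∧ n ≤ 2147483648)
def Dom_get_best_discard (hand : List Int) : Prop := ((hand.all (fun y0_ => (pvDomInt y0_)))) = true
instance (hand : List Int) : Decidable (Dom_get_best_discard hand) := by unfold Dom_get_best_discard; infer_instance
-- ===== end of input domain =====

-- B replaces A's dict-of-lists meld finder by an ordered groupby with a recursive maximal-chain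
-- splitter, and A's 2^m bitmask enumeration of meld subsets by recursive skip/use backtracking.

-- ===== PORT A =====
def cardVal (x : Int) : Int := min 10 (PySem.Int.mod x 13 + 1)

def handVal (l : List Int) : Int := (l.map cardVal).sum

-- inner while loop of the run scan: extends run with cards[j] while consecutive ranks
def runFrom (cards : List Int) (run : List Int) (j : Nat) : List Int × Nat :=
  if _h : j < cards.length ∧
      PySem.Int.mod (cards.getD j 0) 13 = PySem.Int.mod (run.getLastD 0) 13 + 1 then
    runFrom cards (run ++ [cards.getD j 0]) (j + 1)
  else (run, j)
  termination_by cards.length - j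
  decreasing_by exact Nat.sub_succ_lt_self _ _ _h.1

-- outer while loop: `while i < len(cards) - 2: …`
def scanRuns (cards : List Int) (i : Nat) (melds : List (List Int)) : List (List Int) :=
  if _h : i < cards.length - 2 then
    let r := runFrom cards [cards.getD i 0] (i + 1)
    scanRuns cards (if i + 1 < r.2 then r.2 else i + 1)
      (if 3 ≤ r.1.length then melds ++ [r.1] else melds)
  else melds
  termination_by cards.length - i
  decreasing_by
    exact Nat.sub_lt_sub_left (Nat.lt_of_lt_of_le _h (Nat.sub_le _ _))
      (Nat.lt_of_lt_of_le (Nat.lt_succ_self i)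
        (by split
            · exact Nat.le_of_lt (by assumption)
            · exact Nat.le.refl))

def find_melds (hand : List Int) : List (List Int) :=
  if hand = [] then []
  else
    -- one pass building both dicts (ranks.setdefault(r, []).append(card) = modify r [] (· ++ [card]))
    let ds := hand.foldl
      (fun (ds : PySem.Dict Int (List Int) × PySem.Dict Int (List Int)) card =>
        (ds.1.modify (PySem.Int.mod card 13) [] (· ++ [card]),
         ds.2.modify (PySem.Int.floordiv card 13) [] (· ++ [card])))
      (PySem.Dict.empty, PySem.Dict.empty)
    let melds := ds.1.values.foldl
      (fun ms cards => if 3 ≤ cards.length then ms ++ [cards] else ms) []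
    ds.2.values.foldl
      (fun ms cards => scanRuns (PySem.List.sorted cards (fun x => PySem.Int.mod x 13) false) 0 ms)
      melds

-- float('inf') is modelled as `none`; every finite deadwood is an Int.
def optMin (a b : Option Int) : Option Int :=
  match a, b with
  | none, b => b
  | a, none => a
  | some x, some y => some (min x y)

-- the `for j in range(len(melds)): if i & (1 << j): …` loop with its break:
-- walks the meld list with counter j; i & (1 << j) ≠ 0 is i.testBit j (i, j ≥ 0); none = broke out invalid
def maskSelect (melds : List (List Int)) (i : Nat) (j : Nat) (used : PySem.Set Int) :
    Option (PySem.Set Int) :=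
  match melds with
  | [] => some used
  | m :: rest =>
    if i.testBit j then
      if m.any (fun c => used.contains c) then none
      else maskSelect rest i (j + 1) (PySem.Set.update used m)
    else maskSelect rest i (j + 1) used

def get_deadwood (hand : List Int) (melds? : Option (List (List Int))) : Option Int :=
  if hand = [] then none
  else
    let melds := match melds? with | none => find_melds hand | some ms => ms
    if melds = [] then some (handVal hand)
    else
      -- range(1 << len(melds)): the masks 0 … 2^m − 1 (all non-negative, so a Nat range is exact)
      (List.range (2 ^ melds.length)).foldl
        (fun acc i =>
          match maskSelect melds i 0 PySem.Set.empty with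
          | none => acc
          | some used =>
            optMin acc (some (handVal (hand.filter (fun c => !(used.contains c))))))
        none

-- `deadwood < min_deadwood` on int ∪ {inf}
def ltInf (d m : Option Int) : Bool :=
  match d, m with
  | none, _ => false
  | some _, none => true
  | some x, some y => decide (x < y)

def get_best_discard (hand : List Int) : Option Int :=
  if hand = [] then none
  else
    (hand.foldl
      (fun (st : Option Int × Option Int) card =>
        let test := (PySem.List.remove? hand card).getD []   -- card ∈ hand, so remove? succeeds
        let dw := get_deadwood test none
        if ltInf dw st.2 then (some card, dw) else st)
      (none, none)).1

-- ===== PORT B =====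
def pipVal (c : Int) : Int := min 10 (PySem.Int.mod c 13 + 1)

-- _take_chain: first maximal rank-consecutive chain continuing prev, plus the remainder
def takeChain (prev : Int) : List Int → List Int × List Int
  | [] => ([], [])
  | c :: rest =>
    if PySem.Int.mod c 13 = PySem.Int.mod prev 13 + 1 then
      (c :: (takeChain c rest).1, (takeChain c rest).2)
    else ([], c :: rest)

theorem takeChain_snd_length (prev : Int) (l : List Int) :
    (takeChain prev l).2.length ≤ l.length := by
  induction l generalizing prev with
  | nil => simp [takeChain]
  | cons c rest ih =>
    simp only [takeChain]
    split
    · exact Nat.le_succ_of_le (ih c)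
    · exact Nat.le.refl

-- _chains: split a rank-sorted list into its maximal rank-consecutive chains
def chains (l : List Int) : List (List Int) :=
  match l with
  | [] => []
  | c :: rest => (c :: (takeChain c rest).1) :: chains (takeChain c rest).2
  termination_by l.length
  decreasing_by exact Nat.lt_succ_of_le (takeChain_snd_length c rest)

-- _melds: ordered groupby on first-occurrence keys; runs from the chain splitter
def melds_alt (hand : List Int) : List (List Int) :=
  let rankMelds :=
    ((PySem.List.dedup (hand.map (fun c => PySem.Int.mod c 13))).map
        (fun r => hand.filter (fun c => PySem.Int.mod c 13 == r))).filter
      (fun g => decide (3 ≤ g.length))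
  rankMelds ++
    (PySem.List.dedup (hand.map (fun c => PySem.Int.floordiv c 13))).flatMap
      (fun s =>
        (chains (PySem.List.sorted (hand.filter (fun c => PySem.Int.floordiv c 13 == s))
            (fun x => PySem.Int.mod x 13) false)).filter
          (fun ch => decide (3 ≤ ch.length)))

-- _best_deadwood: backtracking over the meld list (skip / use-if-disjoint)
def bestMatch (hand : List Int) (melds : List (List Int)) (used : PySem.Set Int) : Int :=
  match melds with
  | [] => ((hand.filter (fun c => !(used.contains c))).map pipVal).sum
  | first :: rest =>
    let best := bestMatch hand rest used
    if PySem.Set.isdisjoint used first then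
      min best (bestMatch hand rest (PySem.Set.union used (PySem.Set.ofList first)))
    else best

-- the local helper `after(card)`
def bdAfter (hand : List Int) (card : Int) : Int :=
  let rest := (PySem.List.remove? hand card).getD []
  bestMatch rest (melds_alt rest) PySem.Set.empty

def get_best_discard_alt (hand : List Int) : Option Int :=
  if hand.length < 2 then none
  else PySem.List.min? hand (fun card => bdAfter hand card)

-- ===== PRECONDITION & SPEC =====
def Spec_get_best_discard (hand : List Int) (out : Option Int) : Prop := out = get_best_discard_alt hand
instance (hand : List Int) (out : Option Int) : Decidable (Spec_get_best_discard hand out) := by unfold Spec_get_best_discard; infer_instance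

-- ===== CLAIM (what is proved, stated in full; the proofs are below) =====
def Claim_equal_get_best_discard : Prop := ∀ (hand : List Int), Dom_get_best_discard hand → Spec_get_best_discard hand (get_best_discard hand)

-- ===== LEMMAS AND PROOFS =====

-- ---- the two meld finders produce the same list ----

theorem takeChain_append (prev : Int) (l : List Int) :
    (takeChain prev l).1 ++ (takeChain prev l).2 = l := by
  induction l generalizing prev with
  | nil => rfl
  | cons c rest ih =>
    simp only [takeChain]
    split
    · simp [ih c]
    · rfl

theorem length_le_of_mem_chains (l : List Int) :
    ∀ ch ∈ chains l, ch.length ≤ l.length := by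
  induction l using chains.induct with
  | case1 => intro ch h; simp [chains] at h
  | case2 c rest ih =>
    intro ch h
    rw [chains] at h
    rcases List.mem_cons.mp h with h1 | h2
    · subst h1
      have := takeChain_append c rest
      have hlen : (takeChain c rest).1.length ≤ rest.length := by
        have := congrArg List.length this
        simp only [List.length_append] at this
        omega
      simp only [List.length_cons]
      omega
    · have h3 := ih ch h2
      have := takeChain_snd_length c rest
      simp only [List.length_cons]
      omega

theorem runFrom_eq_aux (cards : List Int) :
    ∀ (n j : Nat), cards.length ≤ j + n → ∀ (run : List Int), run ≠ [] →
    runFrom cards run j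
      = (run ++ (takeChain (run.getLastD 0) (cards.drop j)).1,
         j + (takeChain (run.getLastD 0) (cards.drop j)).1.length) := by
  intro n
  induction n with
  | zero =>
    intro j hle run hne
    have hdrop : cards.drop j = [] := List.drop_eq_nil_of_le (by omega)
    rw [runFrom, dif_neg (fun hh => absurd hh.1 (by omega)), hdrop]
    simp [takeChain]
  | succ n ih =>
    intro j hle run hne
    by_cases h : j < cards.length
    · have hdrop : cards.drop j = cards[j] :: cards.drop (j + 1) :=
        List.drop_eq_getElem_cons h
      have hget : cards.getD j 0 = cards[j] := by
        rw [List.getD_eq_getElem?_getD, List.getElem?_eq_getElem h]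
        rfl
      rw [runFrom, hdrop]
      by_cases hc : PySem.Int.mod cards[j] 13 = PySem.Int.mod (run.getLastD 0) 13 + 1
      · rw [dif_pos ⟨h, by rw [hget]; exact hc⟩]
        have hrec := ih (j + 1) (by omega) (run ++ [cards.getD j 0]) (by simp)
        rw [hrec]
        have hlast : (run ++ [cards.getD j 0]).getLastD 0 = cards[j] := by
          simpa using hget
        rw [hlast]
        simp only [takeChain, if_pos hc, hget, Prod.mk.injEq]
        constructor
        · simp
        · simp only [List.length_cons]
          omega
      · rw [dif_neg (by rw [hget]; exact fun hh => hc hh.2)]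
        simp only [takeChain, if_neg hc]
        simp
    · have hdrop : cards.drop j = [] := List.drop_eq_nil_of_le (by omega)
      rw [runFrom, dif_neg (fun hh => absurd hh.1 (by omega))]
      rw [hdrop]
      simp [takeChain]

theorem runFrom_eq (cards : List Int) (j : Nat) (run : List Int) (hne : run ≠ []) :
    runFrom cards run j
      = (run ++ (takeChain (run.getLastD 0) (cards.drop j)).1,
         j + (takeChain (run.getLastD 0) (cards.drop j)).1.length) :=
  runFrom_eq_aux cards cards.length j (by omega) run hne

theorem scanRuns_eq_aux (cards : List Int) :
    ∀ (n i : Nat), cards.length ≤ i + n → ∀ (ms : List (List Int)),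
    scanRuns cards i ms
      = ms ++ (chains (cards.drop i)).filter (fun ch => decide (3 ≤ ch.length)) := by
  intro n
  induction n with
  | zero =>
    intro i hle ms
    rw [scanRuns, dif_neg (by omega)]
    have hdrop : cards.drop i = [] := List.drop_eq_nil_of_le (by omega)
    rw [hdrop]
    simp [chains]
  | succ n ih =>
    intro i hle ms
    by_cases h : i < cards.length - 2
    · have hil : i < cards.length := by omega
      have hdrop : cards.drop i = cards[i] :: cards.drop (i + 1) :=
        List.drop_eq_getElem_cons hil
      have hget : cards.getD i 0 = cards[i] := by
        rw [List.getD_eq_getElem?_getD, List.getElem?_eq_getElem hil]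
        rfl
      rw [scanRuns, dif_pos h]
      change scanRuns cards
          (if i + 1 < (runFrom cards [cards.getD i 0] (i + 1)).2
           then (runFrom cards [cards.getD i 0] (i + 1)).2 else i + 1)
          (if 3 ≤ (runFrom cards [cards.getD i 0] (i + 1)).1.length
           then ms ++ [(runFrom cards [cards.getD i 0] (i + 1)).1] else ms)
        = ms ++ (chains (cards.drop i)).filter (fun ch => decide (3 ≤ ch.length))
      have hr := runFrom_eq cards (i + 1) [cards.getD i 0] (by simp)
      have hlast : ([cards.getD i 0] : List Int).getLastD 0 = cards[i] := by
        simpa using hget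
      rw [hlast] at hr
      set ch := (takeChain cards[i] (cards.drop (i + 1))).1 with hch
      set rem := (takeChain cards[i] (cards.drop (i + 1))).2 with hrem
      have hrem_drop : rem = cards.drop (i + 1 + ch.length) := by
        have happ : ch ++ rem = cards.drop (i + 1) := takeChain_append _ _
        have hstep : rem = (cards.drop (i + 1)).drop ch.length := by
          rw [← happ]; simp
        rw [hstep, List.drop_drop]
      have hidx : (if i + 1 < (runFrom cards [cards.getD i 0] (i + 1)).2
          then (runFrom cards [cards.getD i 0] (i + 1)).2 else i + 1) = i + 1 + ch.length := by
        rw [hr]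
        dsimp only
        split <;> omega
      have hr1 : (runFrom cards [cards.getD i 0] (i + 1)).1 = cards[i] :: ch := by
        rw [hr, hget]; rfl
      rw [hidx, hr1]
      have hrec := ih (i + 1 + ch.length) (by omega)
      rw [hrec, ← hrem_drop]
      have hchains : chains (cards.drop i) = (cards[i] :: ch) :: chains rem := by
        rw [hdrop, chains]
      rw [hchains]
      by_cases h3 : 3 ≤ (cards[i] :: ch).length
      · rw [if_pos h3, List.filter_cons, if_pos (by simpa using h3)]
        simp
      · rw [if_neg h3, List.filter_cons, if_neg (by simpa using h3)]
    · rw [scanRuns, dif_neg h]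
      have hfil : (chains (cards.drop i)).filter (fun ch => decide (3 ≤ ch.length)) = [] := by
        rw [List.filter_eq_nil_iff]
        intro ch hch
        have h1 := length_le_of_mem_chains (cards.drop i) ch hch
        have h2 : (cards.drop i).length = cards.length - i := List.length_drop
        simp only [decide_eq_true_eq]
        omega
      rw [hfil, List.append_nil]

theorem scanRuns_eq (cards : List Int) (i : Nat) (ms : List (List Int)) :
    scanRuns cards i ms
      = ms ++ (chains (cards.drop i)).filter (fun ch => decide (3 ≤ ch.length)) :=
  scanRuns_eq_aux cards cards.length i (by omega) ms

-- the group-by dict built by A's modify loop, read off as an ordered groupby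
theorem groupDict_values (hand : List Int) (key : Int → Int) :
    (hand.foldl (fun d c => d.modify (key c) [] (· ++ [c])) PySem.Dict.empty).values
      = (PySem.List.dedup (hand.map key)).map
          (fun k => hand.filter (fun c => key c == k)) := by
  set d := hand.foldl (fun d c => d.modify (key c) [] (· ++ [c])) PySem.Dict.empty with hd
  have hnd : d.keys.Nodup := by
    exact PySem.Dict.nodup_keys_foldl_modify_key hand key [] (fun _ c v => v ++ [c])
      PySem.Dict.empty (by simp)
  have hkeys : d.keys = PySem.List.dedup (hand.map key) := by
    rw [hd]
    rw [PySem.Dict.keys_foldl_modify_key hand key ([] : List Int) (fun _ c v => v ++ [c])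
      PySem.Dict.empty]
    simp only [PySem.Dict.keys_empty, PySem.List.dedup_eq_ofList]
    rfl
  have hgetD : ∀ k, d.getD k [] = hand.filter (fun c => key c == k) := by
    intro k
    have hmap : d = (hand.map (fun c => (key c, c))).foldl
        (fun d p => d.modify p.1 [] (· ++ [p.2])) PySem.Dict.empty := by
      rw [hd, List.foldl_map]
    rw [hmap, PySem.Dict.getD_foldl_modify_append, List.filter_map]
    simp [List.map_map, Function.comp_def]
  rw [PySem.Dict.values_eq_map_keys d hnd [], hkeys]
  exact List.map_congr_left (fun k _ => hgetD k)

theorem melds_alt_eq (hand : List Int) : melds_alt hand = find_melds hand := by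
  by_cases hh : hand = []
  · subst hh; rfl
  · have hds := PySem.List.foldl_prod_mk
      (f := fun (d : PySem.Dict Int (List Int)) card =>
        d.modify (PySem.Int.mod card 13) [] (· ++ [card]))
      (g := fun (d : PySem.Dict Int (List Int)) card =>
        d.modify (PySem.Int.floordiv card 13) [] (· ++ [card]))
      hand PySem.Dict.empty PySem.Dict.empty
    unfold melds_alt find_melds
    rw [if_neg hh]
    simp only [hds]
    rw [PySem.List.foldl_congr_mem
      (hand.foldl (fun d c => d.modify (PySem.Int.floordiv c 13) [] (· ++ [c]))
        PySem.Dict.empty).values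
      (fun ms cards =>
        scanRuns (PySem.List.sorted cards (fun x => PySem.Int.mod x 13) false) 0 ms)
      (fun ms cards => ms ++
        (chains (PySem.List.sorted cards (fun x => PySem.Int.mod x 13) false)).filter
          (fun ch => decide (3 ≤ ch.length)))
      _ (fun ms cards _ => by simp only [scanRuns_eq, List.drop_zero])]
    rw [PySem.List.foldl_append_eq_flatMap]
    rw [PySem.List.foldl_append_ite_eq_filter (p := fun (cards : List Int) => 3 ≤ cards.length)]
    rw [groupDict_values hand (fun c => PySem.Int.mod c 13),
      groupDict_values hand (fun c => PySem.Int.floordiv c 13)]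
    rw [List.flatMap_map]
    simp

-- ---- deadwood equivalence ----

theorem optMin_none_right (a : Option Int) : optMin a none = a := by
  cases a <;> rfl

theorem optMin_shuffle (a b x y : Option Int) :
    optMin (optMin (optMin a b) x) y = optMin (optMin a x) (optMin b y) := by
  cases a <;> cases b <;> cases x <;> cases y <;> simp [optMin] <;> omega

theorem maskSelect_shift (melds : List (List Int)) (i : Nat) :
    ∀ (j : Nat) (u : PySem.Set Int),
      maskSelect melds i (j + 1) u = maskSelect melds (i / 2) j u := by
  induction melds with
  | nil => intro j u; rfl
  | cons m rest ih =>
    intro j u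
    simp only [maskSelect, Nat.testBit_succ]
    split
    · split
      · rfl
      · exact ih (j + 1) _
    · exact ih (j + 1) u

theorem maskSelect_even (melds : List (List Int)) (m : List Int) (k : Nat) (u : PySem.Set Int) :
    maskSelect (m :: melds) (2 * k) 0 u = maskSelect melds k 0 u := by
  have hbit : (2 * k).testBit 0 = false := by
    simp [Nat.testBit_zero, Nat.mul_mod_right]
  simp only [maskSelect, hbit, Bool.false_eq_true, if_false]
  rw [maskSelect_shift]
  congr 1
  omega

theorem maskSelect_odd (melds : List (List Int)) (m : List Int) (k : Nat) (u : PySem.Set Int) :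
    maskSelect (m :: melds) (2 * k + 1) 0 u =
      (if m.any (fun c => u.contains c) then none
       else maskSelect melds k 0 (PySem.Set.update u m)) := by
  have hbit : (2 * k + 1).testBit 0 = true := by
    simp [Nat.testBit_zero]
  simp only [maskSelect, hbit, if_true]
  split
  · rfl
  · rw [maskSelect_shift]
    congr 1
    omega

theorem pvRangeTwoMul (n : Nat) :
    List.range (2 * n) = (List.range n).flatMap (fun k => [2 * k, 2 * k + 1]) := by
  induction n with
  | zero => rfl
  | succ n ih =>
    have h : 2 * (n + 1) = (2 * n) + 1 + 1 := by ring
    rw [h, List.range_succ, List.range_succ, ih, List.range_succ]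
    simp [List.flatMap_append]

theorem foldl_flatMap_pair (l : List Nat) (u v : Nat → Option Int) (a : Option Int) :
    (l.flatMap (fun k => [u k, v k])).foldl optMin a =
      l.foldl (fun acc k => optMin (optMin acc (u k)) (v k)) a := by
  induction l generalizing a with
  | nil => rfl
  | cons k t ih => simp only [List.flatMap_cons, List.foldl_append, List.foldl_cons,
      List.foldl_nil, ih]

theorem foldl_optMin_split (l : List Nat) (f g : Nat → Option Int) (a b : Option Int) :
    l.foldl (fun acc k => optMin (optMin acc (f k)) (g k)) (optMin a b) =
      optMin (l.foldl (fun acc k => optMin acc (f k)) a)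
             (l.foldl (fun acc k => optMin acc (g k)) b) := by
  induction l generalizing a b with
  | nil => rfl
  | cons k t ih =>
    simp only [List.foldl_cons, optMin_shuffle, ih]

theorem foldl_optMin_none_right (l : List Nat) (f : Nat → Option Int) (a : Option Int) :
    l.foldl (fun acc k => optMin (optMin acc (f k)) none) a =
      l.foldl (fun acc k => optMin acc (f k)) a := by
  refine PySem.List.foldl_congr_mem l _ _ a ?_
  intro acc k _
  exact optMin_none_right _

-- B's skip/use branch, rewritten in A's vocabulary (used.update / the any-test)
theorem bestMatch_cons (hand m : List Int) (rest : List (List Int)) (u : PySem.Set Int) :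
    bestMatch hand (m :: rest) u =
      if m.any (fun c => u.contains c) then bestMatch hand rest u
      else min (bestMatch hand rest u) (bestMatch hand rest (PySem.Set.update u m)) := by
  have hu : PySem.Set.union u (PySem.Set.ofList m) = PySem.Set.update u m := by
    show PySem.Set.update u (PySem.Set.ofList m) = PySem.Set.update u m
    rw [PySem.Set.update_eq_append_filter, PySem.Set.update_eq_append_filter,
      PySem.Set.ofList_ofList]
  have hdis : PySem.Set.isdisjoint u m = !(m.any (fun c => u.contains c)) := by
    rw [Bool.eq_iff_iff]
    simp only [PySem.Set.isdisjoint_iff]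
    simp
    tauto
  show (if PySem.Set.isdisjoint u m then
      min (bestMatch hand rest u) (bestMatch hand rest (PySem.Set.union u (PySem.Set.ofList m)))
    else bestMatch hand rest u) = _
  rw [hu, hdis]
  cases m.any (fun c => u.contains c) <;> simp

theorem enum_eq (hand : List Int) (melds : List (List Int)) :
    ∀ (u : PySem.Set Int),
      (List.range (2 ^ melds.length)).foldl
        (fun acc i =>
          optMin acc ((maskSelect melds i 0 u).map
            (fun used => handVal (hand.filter (fun c => !(used.contains c))))))
        none
      = some (bestMatch hand melds u) := by
  induction melds with
  | nil =>
    intro u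
    rfl
  | cons m rest ih =>
    intro u
    have hlen : 2 ^ (m :: rest).length = 2 * 2 ^ rest.length := by
      simp [List.length_cons, pow_succ]; ring
    rw [hlen, pvRangeTwoMul]
    have hpair :
        ((List.range (2 ^ rest.length)).flatMap (fun k => [2 * k, 2 * k + 1])).foldl
          (fun acc i =>
            optMin acc ((maskSelect (m :: rest) i 0 u).map
              (fun used => handVal (hand.filter (fun c => !(used.contains c))))))
          none
        = ((List.range (2 ^ rest.length)).flatMap
            (fun k => [(maskSelect (m :: rest) (2 * k) 0 u).map
                (fun used => handVal (hand.filter (fun c => !(used.contains c)))),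
              (maskSelect (m :: rest) (2 * k + 1) 0 u).map
                (fun used => handVal (hand.filter (fun c => !(used.contains c))))])).foldl
            optMin none := by
      rw [foldl_flatMap_pair]
      rw [List.foldl_flatMap]
      refine PySem.List.foldl_congr_mem _ _ _ none ?_
      intro acc k _
      rfl
    rw [hpair, foldl_flatMap_pair]
    simp only [maskSelect_even, maskSelect_odd]
    rw [bestMatch_cons]
    cases hany : m.any (fun c => u.contains c) with
    | true =>
      simp only [if_true, Option.map_none]
      rw [foldl_optMin_none_right, ih u]
    | false =>
      simp only [Bool.false_eq_true, if_false]
      have h0 : (none : Option Int) = optMin none none := rfl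
      rw [h0, foldl_optMin_split, ih u, ih (PySem.Set.update u m)]
      rfl

theorem pipVal_eq_cardVal : pipVal = cardVal := rfl

theorem get_deadwood_eq (hand : List Int) (hne : hand ≠ []) :
    get_deadwood hand none
      = some (bestMatch hand (melds_alt hand) PySem.Set.empty) := by
  unfold get_deadwood
  simp only [hne, if_false]
  rw [melds_alt_eq]
  by_cases hm : find_melds hand = []
  · simp only [hm, if_true]
    simp [bestMatch, PySem.Set.contains, PySem.Set.empty, handVal, pipVal_eq_cardVal]
  · simp only [hm, if_false]
    rw [← enum_eq hand (find_melds hand) PySem.Set.empty]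
    refine PySem.List.foldl_congr_mem _ _ _ none ?_
    intro acc i _
    cases h : maskSelect (find_melds hand) i 0 PySem.Set.empty with
    | none => simp [optMin_none_right]
    | some used => simp

theorem argmin_eq (key : Int → Int) (t : List Int) :
    ∀ (b : Int),
      (t.foldl
        (fun (st : Option Int × Option Int) c =>
          if ltInf (some (key c)) st.2 then (some c, some (key c)) else st)
        (some b, some (key b))).1
      = t.foldl
          (fun acc c =>
            match acc with
            | none => some c
            | some m => if key c < key m then some c else some m)
          (some b) := by
  induction t with
  | nil => intro b; rfl
  | cons c t ih =>
    intro b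
    rw [List.foldl_cons, List.foldl_cons]
    by_cases h : key c < key b
    · have h1 : ltInf (some (key c)) (some (key b)) = true := by simp [ltInf, h]
      simp only [h1, if_true, h, if_true]
      exact ih c
    · have h1 : ltInf (some (key c)) (some (key b)) = false := by simp [ltInf, h]
      simp only [h1, Bool.false_eq_true, if_false, h, if_false]
      exact ih b

-- ===== VERDICT (by name: the statement is the Claim_ definition above) =====
theorem get_best_discard_spec : Claim_equal_get_best_discard := by
  intro hand _
  unfold Spec_get_best_discard
  match hand with
  | [] => rfl
  | [c] =>
    simp [get_best_discard, get_best_discard_alt, get_deadwood, ltInf]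
  | a :: b :: t =>
    have hc : ∀ (acc : Option Int × Option Int), ∀ card ∈ (a :: b :: t),
        (fun (st : Option Int × Option Int) card =>
          if ltInf (get_deadwood ((PySem.List.remove? (a :: b :: t) card).getD []) none) st.2
          then (some card, get_deadwood ((PySem.List.remove? (a :: b :: t) card).getD []) none)
          else st) acc card
        = (fun (st : Option Int × Option Int) card =>
          if ltInf (some (bdAfter (a :: b :: t) card)) st.2
          then (some card, some (bdAfter (a :: b :: t) card))
          else st) acc card := by
      intro acc card hmem
      have hrem : PySem.List.remove? (a :: b :: t) card = some ((a :: b :: t).erase card) :=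
        PySem.List.remove?_eq_some_erase _ card hmem
      have herase : (a :: b :: t).erase card ≠ [] := by
        have hl := List.length_erase_of_mem hmem
        intro hnil
        rw [hnil] at hl
        simp at hl
      simp only [bdAfter, hrem, Option.getD_some, get_deadwood_eq _ herase]
    have hstep := PySem.List.foldl_congr_mem (a :: b :: t) _ _
      ((none : Option Int), (none : Option Int)) hc
    unfold get_best_discard get_best_discard_alt
    rw [if_neg (by simp : ¬(a :: b :: t) = []),
      if_neg (by simp : ¬(a :: b :: t).length < 2)]
    rw [hstep, List.foldl_cons]
    rw [show (if ltInf (some (bdAfter (a :: b :: t) a))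
            ((none : Option Int), (none : Option Int)).2 = true
          then (some a, some (bdAfter (a :: b :: t) a))
          else ((none : Option Int), (none : Option Int)))
        = (some a, some (bdAfter (a :: b :: t) a)) from rfl]
    rw [argmin_eq (fun card => bdAfter (a :: b :: t) card) (b :: t) a]
    simp only [PySem.List.min?, List.foldl_cons]
    exact PySem.List.foldl_congr_mem _ _ _ _ (fun acc x _ => by cases acc <;> rfl)
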